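-- pv_equiv track=rewrite | github.com/Topdinh/aspectmind | scripts/evaluate_models.py | extract_gold_aspects
-- ===== SOURCE A (Python) =====
-- from typing import Dict, Iterable, List, Optional, Tuple
--
-- def parse_label_tag(tag: str) -> Tuple[Optional[str], Optional[str]]:
--     # Example: "BATTERY#POSITIVE"
--     if "#" not in tag:
--         return None, None
--     a, s = tag.split("#", 1)
--     return a.strip(), s.strip()
--
-- def extract_gold_aspects(
--     obj: dict,
--     target_aspects: List[str],
--     aspect_mapping: Dict[str, str],
--     ignored_aspects: set,
--     text_field: str = "text",
--     label_field: str = "labels",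
-- ) -> Dict[str, int]:
--     """
--     Convert labels spans into a multi-label vector for aspect presence: {aspect: 0/1}.
--     If an aspect appears at least once in labels => 1 else 0.
--     """
--     y = {a: 0 for a in target_aspects}
--
--     labels = obj.get(label_field, [])
--     for start, end, tag in labels:
--         raw_aspect, _raw_sent = parse_label_tag(tag)
--         if raw_aspect is None:
--             continue
--         if raw_aspect in ignored_aspects:
--             continue
--         mapped = aspect_mapping.get(raw_aspect)
--         if mapped in y:
--             y[mapped] = 1
--
--     return y
-- ===== SOURCE B (Python) =====
-- from typing import Dict, List, Optional, Tuple
--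
-- def parse_label_tag(tag: str) -> Tuple[Optional[str], Optional[str]]:
--     if "#" not in tag:
--         return None, None
--     a, s = tag.split("#", 1)
--     return a.strip(), s.strip()
--
-- def extract_gold_aspects(
--     obj: dict,
--     target_aspects: List[str],
--     aspect_mapping: Dict[str, str],
--     ignored_aspects: set,
--     text_field: str = "text",
--     label_field: str = "labels",
-- ) -> Dict[str, int]:
--     # Per-target search: for each target aspect, scan the labels for a first
--     # label that maps to it (no shared dict mutated while scanning labels).
--     labels = obj.get(label_field, [])
--
--     def hit(a: str) -> int:
--         for start, end, tag in labels:
--             raw_aspect, _raw_sent = parse_label_tag(tag)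
--             if raw_aspect is None or raw_aspect in ignored_aspects:
--                 continue
--             if aspect_mapping.get(raw_aspect) == a:
--                 return 1
--         return 0
--
--     return {a: hit(a) for a in target_aspects}
-- ===== Notes on version B (the rewrite author's own statement) =====
-- stated objective: alternative
-- what changed: Inverted traversal: instead of one pass over labels mutating a pre-zeroed dict keyed by target, B loops over target_aspects and for each target scans the labels for a first label mapping to it (early-exit per-target search), trading the shared dict for independent searches.
import Mathlib
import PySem

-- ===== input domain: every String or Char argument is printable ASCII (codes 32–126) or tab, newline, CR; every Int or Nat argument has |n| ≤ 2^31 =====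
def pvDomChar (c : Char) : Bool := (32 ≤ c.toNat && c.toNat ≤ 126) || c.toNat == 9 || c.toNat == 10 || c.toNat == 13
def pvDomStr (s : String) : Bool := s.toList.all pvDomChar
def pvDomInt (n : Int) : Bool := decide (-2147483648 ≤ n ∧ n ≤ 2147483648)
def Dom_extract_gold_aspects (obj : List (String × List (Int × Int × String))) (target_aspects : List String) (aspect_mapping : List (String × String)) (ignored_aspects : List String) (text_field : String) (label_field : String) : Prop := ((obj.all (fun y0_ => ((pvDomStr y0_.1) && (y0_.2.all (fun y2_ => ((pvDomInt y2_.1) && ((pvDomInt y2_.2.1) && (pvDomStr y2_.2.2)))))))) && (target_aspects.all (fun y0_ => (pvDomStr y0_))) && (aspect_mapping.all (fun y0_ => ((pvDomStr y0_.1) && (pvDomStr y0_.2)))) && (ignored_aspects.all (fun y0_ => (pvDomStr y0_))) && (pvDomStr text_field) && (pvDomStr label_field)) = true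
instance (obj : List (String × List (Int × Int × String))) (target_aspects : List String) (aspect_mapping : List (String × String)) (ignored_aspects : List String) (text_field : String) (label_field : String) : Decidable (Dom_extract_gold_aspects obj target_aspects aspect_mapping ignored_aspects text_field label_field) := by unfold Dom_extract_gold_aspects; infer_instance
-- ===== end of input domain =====

-- B inverts the traversal: an early-exit search over the labels per target aspect, instead of A's
-- single label pass mutating a pre-zeroed dict; equivalence of the RETURN value is proved below.

-- ===== PORT A =====
-- shared module-level helper parse_label_tag (used by both A and Source B)
def parse_label_tag (tag : String) : Option String × Option String :=
  if PySem.Str.isIn "#" tag then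
    match PySem.Str.splitMax? tag "#" 1 with
    | some (a :: s :: _) => (some (PySem.Str.strip a), some (PySem.Str.strip s))
    | _ => (none, none)  -- unreachable: with "#" in tag, split("#", 1) yields exactly two pieces
  else (none, none)

def extract_gold_aspects (obj : List (String × List (Int × Int × String))) (target_aspects : List String) (aspect_mapping : List (String × String)) (ignored_aspects : List String) (text_field : String) (label_field : String) : List (String × Int) :=
  let y0 : PySem.Dict String Int :=
    target_aspects.foldl (fun d a => d.insert a 0) PySem.Dict.empty
  let labels := (PySem.Dict.mk obj).getD label_field []
  let y := labels.foldl (fun y lbl =>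
    match (parse_label_tag lbl.2.2).1 with
    | none => y
    | some raw_aspect =>
      if ignored_aspects.contains raw_aspect then y
      else
        match (PySem.Dict.mk aspect_mapping).get? raw_aspect with
        | some mapped => if y.contains mapped then y.insert mapped 1 else y
        | none => y) y0   -- mapped = None is never a key of y
  y.items

-- ===== PORT B =====
-- Source B's inner function hit(a): scan the labels, return 1 at the first label mapping to a, else 0
def hitB (aspect_mapping : List (String × String)) (ignored_aspects : List String) (a : String) : List (Int × Int × String) → Int
  | [] => 0
  | lbl :: rest =>
    match (parse_label_tag lbl.2.2).1 with
    | none => hitB aspect_mapping ignored_aspects a rest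
    | some raw_aspect =>
      if ignored_aspects.contains raw_aspect then hitB aspect_mapping ignored_aspects a rest
      else if (PySem.Dict.mk aspect_mapping).get? raw_aspect == some a then 1
      else hitB aspect_mapping ignored_aspects a rest

def extract_gold_aspects_alt (obj : List (String × List (Int × Int × String))) (target_aspects : List String) (aspect_mapping : List (String × String)) (ignored_aspects : List String) (text_field : String) (label_field : String) : List (String × Int) :=
  let labels := (PySem.Dict.mk obj).getD label_field []
  -- {a: hit(a) for a in target_aspects}: a dict comprehension whose value depends only on the key
  -- is the ordered dedup of the keys paired with the values
  (PySem.List.dedup target_aspects).map (fun a => (a, hitB aspect_mapping ignored_aspects a labels))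

-- ===== PRECONDITION & SPEC =====
def Spec_extract_gold_aspects (obj : List (String × List (Int × Int × String))) (target_aspects : List String) (aspect_mapping : List (String × String)) (ignored_aspects : List String) (text_field : String) (label_field : String) (out : List (String × Int)) : Prop := out = extract_gold_aspects_alt obj target_aspects aspect_mapping ignored_aspects text_field label_field
instance (obj : List (String × List (Int × Int × String))) (target_aspects : List String) (aspect_mapping : List (String × String)) (ignored_aspects : List String) (text_field : String) (label_field : String) (out : List (String × Int)) : Decidable (Spec_extract_gold_aspects obj target_aspects aspect_mapping ignored_aspects text_field label_field out) := by unfold Spec_extract_gold_aspects; infer_instance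

-- ===== CLAIM (what is proved, stated in full; the proofs are below) =====
def Claim_equal_extract_gold_aspects : Prop := ∀ (obj : List (String × List (Int × Int × String))) (target_aspects : List String) (aspect_mapping : List (String × String)) (ignored_aspects : List String) (text_field : String) (label_field : String), Dom_extract_gold_aspects obj target_aspects aspect_mapping ignored_aspects text_field label_field → Spec_extract_gold_aspects obj target_aspects aspect_mapping ignored_aspects text_field label_field (extract_gold_aspects obj target_aspects aspect_mapping ignored_aspects text_field label_field)

-- ===== LEMMAS AND PROOFS =====

-- the mapped aspect a single label contributes (none = skipped), shared analysis of both programs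
def mappedOf (aspect_mapping : List (String × String)) (ignored_aspects : List String) (lbl : Int × Int × String) : Option String :=
  match (parse_label_tag lbl.2.2).1 with
  | none => none
  | some raw_aspect =>
    if ignored_aspects.contains raw_aspect then none
    else (PySem.Dict.mk aspect_mapping).get? raw_aspect

-- A's loop body in terms of mappedOf
lemma stepA_eq (am : List (String × String)) (ig : List String) (d : PySem.Dict String Int) (lbl : Int × Int × String) :
    (match (parse_label_tag lbl.2.2).1 with
     | none => d
     | some raw_aspect =>
       if ig.contains raw_aspect then d
       else
         match (PySem.Dict.mk am).get? raw_aspect with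
         | some mapped => if d.contains mapped then d.insert mapped 1 else d
         | none => d) =
    (match mappedOf am ig lbl with
     | some m => if d.contains m then d.insert m 1 else d
     | none => d) := by
  unfold mappedOf
  cases (parse_label_tag lbl.2.2).1 with
  | none => rfl
  | some ra =>
    simp only
    by_cases h : ra ∈ ig <;> simp [h]

-- hitB's step expressed through mappedOf (mirrors stepA_eq)
lemma hitB_cons (am : List (String × String)) (ig : List String) (a : String) (l : Int × Int × String) (ls : List (Int × Int × String)) :
    hitB am ig a (l :: ls) =
    (match mappedOf am ig l with
     | some m => if m = a then 1 else hitB am ig a ls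
     | none => hitB am ig a ls) := by
  rw [show hitB am ig a (l :: ls) =
    (match (parse_label_tag l.2.2).1 with
     | none => hitB am ig a ls
     | some ra =>
       if ig.contains ra then hitB am ig a ls
       else if (PySem.Dict.mk am).get? ra == some a then 1
       else hitB am ig a ls) from rfl]
  unfold mappedOf
  cases (parse_label_tag l.2.2).1 with
  | none => rfl
  | some ra =>
    simp only
    by_cases hig : ig.contains ra = true
    · have hmem : ra ∈ ig := by simpa using hig
      simp [hmem]
    · simp only [hig, Bool.false_eq_true, if_false]
      cases hm : (PySem.Dict.mk am).get? ra with
      | none => simp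
      | some m =>
        by_cases hma : m = a <;> simp [hma]

-- B's per-target search decided by mappedOf: 1 iff some label maps to a
lemma hitB_eq (am : List (String × String)) (ig : List String) (a : String) (labels : List (Int × Int × String)) :
    hitB am ig a labels = if some a ∈ labels.map (mappedOf am ig) then 1 else 0 := by
  induction labels with
  | nil => simp [hitB]
  | cons l ls ih =>
    rw [hitB_cons]
    simp only [List.map_cons, List.mem_cons]
    cases h : mappedOf am ig l with
    | none => simp only [ih, reduceCtorEq, false_or]
    | some m =>
      by_cases hma : m = a
      · subst hma; simp
      · show (if m = a then (1 : Int) else hitB am ig a ls) = _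
        rw [if_neg hma, ih]
        have h1 : ¬ (some a = some m) := fun hc => hma (Option.some.inj hc).symm
        exact (if_congr (or_iff_right h1) rfl rfl).symm

-- keys are invariant through A's loop
lemma keys_A_fold (am : List (String × String)) (ig : List String) (labels : List (Int × Int × String)) (d : PySem.Dict String Int) :
    (labels.foldl (fun d lbl =>
      match mappedOf am ig lbl with
      | some m => if d.contains m then d.insert m 1 else d
      | none => d) d).keys = d.keys := by
  induction labels generalizing d with
  | nil => rfl
  | cons l ls ih =>
    simp only [List.foldl_cons]
    cases h : mappedOf am ig l with
    | none => simpa [h] using ih d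
    | some m =>
      by_cases hc : d.contains m
      · have hk : (d.insert m 1).keys = d.keys := by
          have := PySem.Dict.keys_foldl_insert [m] (fun _ _ => (1 : Int)) d
          simp only [List.foldl_cons, List.foldl_nil] at this
          rw [this]
          have hm : m ∈ d.keys := (PySem.Dict.contains_iff_mem_keys d m).mp hc
          simp [PySem.Set.update, PySem.Set.add_of_mem hm]
        simp only [hc, if_true]
        rw [ih, hk]
      · simp only [Bool.not_eq_true] at hc
        simp only [hc, Bool.false_eq_true, if_false]
        exact ih d

-- the value A's loop leaves at key k
lemma getD_A_fold (am : List (String × String)) (ig : List String) (labels : List (Int × Int × String)) (d : PySem.Dict String Int) (k : String) :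
    (labels.foldl (fun d lbl =>
      match mappedOf am ig lbl with
      | some m => if d.contains m then d.insert m 1 else d
      | none => d) d).getD k 0 =
    if d.contains k ∧ some k ∈ labels.map (mappedOf am ig) then 1 else d.getD k 0 := by
  induction labels generalizing d with
  | nil => simp
  | cons l ls ih =>
    simp only [List.foldl_cons, List.map_cons, List.mem_cons]
    cases h : mappedOf am ig l with
    | none =>
      rw [ih]
      have h3 : (some k = (none : Option String) ∨ some k ∈ List.map (mappedOf am ig) ls) ↔ some k ∈ List.map (mappedOf am ig) ls := by simp
      simp only [h3]
    | some m =>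
      by_cases hc : d.contains m
      · simp only [hc, if_true]
        rw [ih]
        by_cases hkm : k = m
        · subst hkm
          have h1 : (d.insert k 1).contains k := PySem.Dict.contains_insert_self d k 1
          have h2 : (d.insert k 1).getD k 0 = 1 := PySem.Dict.getD_insert_self d k 1 0
          simp [h1, h2, hc]
        · have h1 : (d.insert m 1).contains k = d.contains k := by
            rw [PySem.Dict.contains_insert]
            simp [hkm]
          have h2 : (d.insert m 1).getD k 0 = d.getD k 0 :=
            PySem.Dict.getD_insert_of_ne d 1 0 hkm
          rw [h1, h2]
          have h3 : (some k = some m ∨ some k ∈ List.map (mappedOf am ig) ls) ↔ some k ∈ List.map (mappedOf am ig) ls := by simp [hkm]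
          simp only [h3]
      · simp only [Bool.not_eq_true] at hc
        simp only [hc, Bool.false_eq_true, if_false]
        rw [ih]
        by_cases hkm : k = m
        · subst hkm
          simp [hc]
        · have h3 : (some k = some m ∨ some k ∈ List.map (mappedOf am ig) ls) ↔ some k ∈ List.map (mappedOf am ig) ls := by simp [hkm]
          simp only [h3]

-- the zero-initialised dict: every lookup with default 0 is 0
lemma getD_zero_init (ts : List String) (d : PySem.Dict String Int) (k : String) (h : d.getD k 0 = 0) :
    (ts.foldl (fun d a => d.insert a 0) d).getD k 0 = 0 := by
  induction ts generalizing d with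
  | nil => exact h
  | cons a as ih =>
    simp only [List.foldl_cons]
    apply ih
    by_cases hk : k = a
    · subst hk; exact PySem.Dict.getD_insert_self d k 0 0
    · rw [PySem.Dict.getD_insert_of_ne d 0 0 hk]; exact h

-- keys of the zero-initialised dict
lemma keys_zero_init (ts : List String) :
    (ts.foldl (fun d a => d.insert a (0 : Int)) PySem.Dict.empty).keys = PySem.Set.ofList ts := by
  have := PySem.Dict.keys_foldl_insert ts (fun _ _ => (0 : Int)) PySem.Dict.empty
  rw [this]
  rfl

-- ===== VERDICT (by name: the statement is the Claim_ definition above) =====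
theorem extract_gold_aspects_spec : Claim_equal_extract_gold_aspects := by
  intro obj ts am ig tf lf _
  unfold Spec_extract_gold_aspects extract_gold_aspects extract_gold_aspects_alt
  simp only [stepA_eq]
  set labels := (PySem.Dict.mk obj).getD lf [] with hlabels
  set d0 := ts.foldl (fun d a => d.insert a (0 : Int)) PySem.Dict.empty with hd0
  set y := labels.foldl (fun d lbl =>
      match mappedOf am ig lbl with
      | some m => if d.contains m then d.insert m 1 else d
      | none => d) d0 with hy
  have hkeys : y.keys = PySem.Set.ofList ts := by
    rw [hy, keys_A_fold, hd0, keys_zero_init]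
  have hnd : y.keys.Nodup := by rw [hkeys]; exact PySem.Set.nodup_ofList ts
  have hitems := PySem.Dict.items_eq_map_keys y hnd 0
  rw [hitems, hkeys, PySem.List.dedup_eq_ofList]
  apply List.map_congr_left
  intro k hk
  have hck : d0.contains k := by
    rw [← hkeys] at hk
    rw [hd0]
    exact (PySem.Dict.contains_iff_mem_keys d0 k).mpr (by rw [keys_zero_init, ← hkeys]; exact hk)
  have hval : y.getD k 0 = if some k ∈ labels.map (mappedOf am ig) then 1 else 0 := by
    rw [hy, getD_A_fold]
    have h0 : d0.getD k 0 = 0 := by rw [hd0]; exact getD_zero_init ts PySem.Dict.empty k rfl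
    have h4 : (d0.contains k = true ∧ some k ∈ List.map (mappedOf am ig) labels) ↔ some k ∈ List.map (mappedOf am ig) labels := by simp [hck]
    simp only [h4, h0]
  rw [hval, hitB_eq]
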